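-- pv_equiv track=rewrite | github.com/topstolenname/agisa_sac | src/agisa_sac/core/components/semantic_analyzer.py | _dict_to_semantic_text
-- ===== SOURCE A (Python) =====
-- from typing import Dict, List, Optional, Tuple
--
-- def _dict_to_semantic_text(content: Dict) -> str:
--     """Convert dictionary content to semantically meaningful text"""
--     text_parts: List[str] = []
--     priority_keys = [
--         "observation",
--         "learning",
--         "decision",
--         "outcome",
--         "context",
--         "reasoning",
--     ]
--     for key in priority_keys:
--         if key in content:
--             text_parts.append(f"{key}: {content[key]}")
--     for key, value in content.items():
--         if key not in priority_keys:
--             text_parts.append(f"{key}: {value}")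
--     return " | ".join(text_parts)
-- ===== SOURCE B (Python) =====
-- def _dict_to_semantic_text(content):
--     """Single pass: distribute each item into a rank bucket (priority index, or last), then join."""
--     priority_keys = [
--         "observation",
--         "learning",
--         "decision",
--         "outcome",
--         "context",
--         "reasoning",
--     ]
--     rank = {k: i for i, k in enumerate(priority_keys)}
--     n = len(priority_keys)
--     buckets = [[] for _ in range(n + 1)]
--     for key, value in content.items():
--         buckets[rank.get(key, n)].append(f"{key}: {value}")
--     return " | ".join(part for bucket in buckets for part in bucket)
-- ===== Notes on version B (the rewrite author's own statement) =====
-- stated objective: alternative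
-- what changed: A does one membership-test-plus-lookup scan per priority key and then a second filtering pass over the dict; B makes a single pass over the items, dropping each into a bucket indexed by the key's priority rank (built once from the priority list), and joins the concatenated buckets.
import Mathlib
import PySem

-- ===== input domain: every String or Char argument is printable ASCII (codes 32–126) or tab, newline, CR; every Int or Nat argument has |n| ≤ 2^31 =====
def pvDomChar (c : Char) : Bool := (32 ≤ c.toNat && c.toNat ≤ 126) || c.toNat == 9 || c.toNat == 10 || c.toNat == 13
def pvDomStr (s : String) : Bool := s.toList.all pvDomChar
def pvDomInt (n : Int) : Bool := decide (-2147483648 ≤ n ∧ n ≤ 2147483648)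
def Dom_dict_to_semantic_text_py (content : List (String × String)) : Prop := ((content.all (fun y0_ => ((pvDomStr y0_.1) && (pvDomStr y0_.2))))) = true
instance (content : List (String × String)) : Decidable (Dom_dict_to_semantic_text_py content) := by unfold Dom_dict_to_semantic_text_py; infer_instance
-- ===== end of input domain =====

-- B replaces A's two scans (a lookup per priority key, then a filtering pass) by a single
-- pass distributing each item into a rank bucket; objective: alternative decomposition.


-- ===== PORT A =====
def dict_to_semantic_text_py (content : List (String × String)) : String :=
  let d := PySem.Dict.mk content
  let priority_keys : List String :=
    ["observation", "learning", "decision", "outcome", "context", "reasoning"]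
  -- for key in priority_keys: if key in content: append f"{key}: {content[key]}"
  -- (content[key] is d.get?; it is some whenever the contains test passed, so getD "" is exact)
  let text_parts := priority_keys.foldl (fun acc key =>
      if d.contains key then acc ++ [key ++ ": " ++ d.getD key ""] else acc) []
  -- for key, value in content.items(): if key not in priority_keys: append f"{key}: {value}"
  let text_parts := content.foldl (fun acc kv =>
      if kv.1 ∈ priority_keys then acc else acc ++ [kv.1 ++ ": " ++ kv.2]) text_parts
  PySem.Str.join " | " text_parts

-- ===== PORT B =====
def dict_to_semantic_text_py_alt (content : List (String × String)) : String :=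
  let priority_keys : List String :=
    ["observation", "learning", "decision", "outcome", "context", "reasoning"]
  -- rank = {k: i for i, k in enumerate(priority_keys)}
  let rank := (PySem.List.enumerate priority_keys).foldl
      (fun d p => d.insert p.2 p.1) (PySem.Dict.empty (κ := String) (ν := Int))
  let n : Int := priority_keys.length
  let buckets0 : List (List String) := List.replicate (priority_keys.length + 1) []
  -- buckets[rank.get(key, n)].append(f"{key}: {value}")  — the index is always in range,
  -- so List.set / getD with default [] is exact
  let buckets := content.foldl (fun bs kv =>
      let r := (rank.getD kv.1 n).toNat
      bs.set r (bs.getD r [] ++ [kv.1 ++ ": " ++ kv.2])) buckets0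
  PySem.Str.join " | " buckets.flatten

-- ===== PRECONDITION & SPEC =====
-- Pre_ excludes association lists with duplicate keys: they do not represent any Python dict
-- (the Python argument is a dict, whose keys are necessarily distinct), so nothing is claimed there.
def Pre_dict_to_semantic_text_py (content : List (String × String)) : Prop :=
  (content.map Prod.fst).Nodup
instance (content : List (String × String)) : Decidable (Pre_dict_to_semantic_text_py content) := by unfold Pre_dict_to_semantic_text_py; infer_instance
def pvWitness_dict_to_semantic_text_py : (List (String × String)) :=
  [("learning", "x"), ("zzz", "q"), ("observation", "y")]
def Spec_dict_to_semantic_text_py (content : List (String × String)) (out : String) : Prop := out = dict_to_semantic_text_py_alt content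
instance (content : List (String × String)) (out : String) : Decidable (Spec_dict_to_semantic_text_py content out) := by unfold Spec_dict_to_semantic_text_py; infer_instance

-- ===== CLAIM (what is proved, stated in full; the proofs are below) =====
def Claim_equal_dict_to_semantic_text_py : Prop := ∀ (content : List (String × String)), Dom_dict_to_semantic_text_py content → Pre_dict_to_semantic_text_py content → Spec_dict_to_semantic_text_py content (dict_to_semantic_text_py content)



-- ===== LEMMAS AND PROOFS =====

-- Proof-side vocabulary: the priority list, the formatter, the rank of a key (0..5 for
-- priority keys, 6 otherwise), and the rank-r bucket of a list.
def pvP : List String :=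
  ["observation", "learning", "decision", "outcome", "context", "reasoning"]

def pvFmt (kv : String × String) : String := kv.1 ++ ": " ++ kv.2

def pvRnk (k : String) : Nat :=
  if k = "observation" then 0
  else if k = "learning" then 1
  else if k = "decision" then 2
  else if k = "outcome" then 3
  else if k = "context" then 4
  else if k = "reasoning" then 5
  else 6

def pvG (r : Nat) (xs : List (String × String)) : List String :=
  (xs.filter (fun kv => pvRnk kv.1 = r)).map pvFmt

-- B's literal rank dict looks up to pvRnk.
lemma pvRank_getD (k : String) :
    (((PySem.List.enumerate pvP).foldl (fun d p => d.insert p.2 p.1)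
        (PySem.Dict.empty (κ := String) (ν := Int))).getD k 6).toNat = pvRnk k := by
  have h : (PySem.List.enumerate pvP).foldl (fun d p => d.insert p.2 p.1)
      (PySem.Dict.empty (κ := String) (ν := Int)) =
      PySem.Dict.mk [("observation", 0), ("learning", 1), ("decision", 2),
        ("outcome", 3), ("context", 4), ("reasoning", 5)] := by decide
  rw [h, PySem.Dict.getD_eq_get?_getD]
  by_cases h1 : k = "observation"
  · subst h1; decide
  by_cases h2 : k = "learning"
  · subst h2; decide
  by_cases h3 : k = "decision"
  · subst h3; decide
  by_cases h4 : k = "outcome"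
  · subst h4; decide
  by_cases h5 : k = "context"
  · subst h5; decide
  by_cases h6 : k = "reasoning"
  · subst h6; decide
  have b1 : ("observation" == k) = false := beq_eq_false_iff_ne.mpr fun hh => h1 hh.symm
  have b2 : ("learning" == k) = false := beq_eq_false_iff_ne.mpr fun hh => h2 hh.symm
  have b3 : ("decision" == k) = false := beq_eq_false_iff_ne.mpr fun hh => h3 hh.symm
  have b4 : ("outcome" == k) = false := beq_eq_false_iff_ne.mpr fun hh => h4 hh.symm
  have b5 : ("context" == k) = false := beq_eq_false_iff_ne.mpr fun hh => h5 hh.symm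
  have b6 : ("reasoning" == k) = false := beq_eq_false_iff_ne.mpr fun hh => h6 hh.symm
  have hnil : ({ items := [] } : PySem.Dict String Int).get? k = none := rfl
  simp [PySem.Dict.get?_mk_cons, hnil, pvRnk,
    b1, b2, b3, b4, b5, b6, h1, h2, h3, h4, h5, h6]

lemma pvG_cons (r : Nat) (kv : String × String) (xs : List (String × String)) :
    pvG r (kv :: xs) = (if pvRnk kv.1 = r then [pvFmt kv] else []) ++ pvG r xs := by
  simp only [pvG, List.filter_cons]
  split_ifs with h h' h' <;> simp_all

-- The bucket-distributing fold, characterised.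
lemma pvFold_buckets (xs : List (String × String)) (b0 b1 b2 b3 b4 b5 b6 : List String) :
    xs.foldl (fun bs kv =>
        bs.set (pvRnk kv.1) (bs.getD (pvRnk kv.1) [] ++ [kv.1 ++ ": " ++ kv.2]))
      [b0, b1, b2, b3, b4, b5, b6]
    = [b0 ++ pvG 0 xs, b1 ++ pvG 1 xs, b2 ++ pvG 2 xs, b3 ++ pvG 3 xs,
       b4 ++ pvG 4 xs, b5 ++ pvG 5 xs, b6 ++ pvG 6 xs] := by
  induction xs generalizing b0 b1 b2 b3 b4 b5 b6 with
  | nil => simp [pvG]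
  | cons kv xs ih =>
    have hr : pvRnk kv.1 = 0 ∨ pvRnk kv.1 = 1 ∨ pvRnk kv.1 = 2 ∨ pvRnk kv.1 = 3 ∨
        pvRnk kv.1 = 4 ∨ pvRnk kv.1 = 5 ∨ pvRnk kv.1 = 6 := by
      unfold pvRnk; split_ifs <;> simp
    simp only [List.getD] at ih
    simp only [List.foldl_cons, pvG_cons]
    rcases hr with h | h | h | h | h | h | h <;>
      simp only [h, List.set_cons_zero, List.set_cons_succ, List.getD,
        List.getElem?_cons_zero, List.getElem?_cons_succ, Option.getD_some, ih] <;>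
      simp [pvFmt]

-- With distinct keys, the bucket of key k is A's lookup of k.
lemma pvFilter_key (xs : List (String × String)) (k : String)
    (h : (xs.map Prod.fst).Nodup) :
    xs.filter (fun kv => kv.1 = k) =
      (match (PySem.Dict.mk xs).get? k with
       | some v => [(k, v)]
       | none => ([] : List (String × String))) := by
  induction xs with
  | nil => simp [PySem.Dict.get?]
  | cons a t ih =>
    obtain ⟨a1, a2⟩ := a
    simp only [List.map_cons, List.nodup_cons] at h
    rw [List.filter_cons, PySem.Dict.get?_mk_cons]
    by_cases hk : a1 = k
    · subst hk
      have ht : t.filter (fun kv => kv.1 = a1) = [] :=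
        List.filter_eq_nil_iff.mpr
          (fun kv hkv hc =>
            h.1 ((of_decide_eq_true hc) ▸ List.mem_map_of_mem hkv))
      simp [ht]
    · simp only [beq_iff_eq, decide_eq_true_eq, if_neg hk]
      exact ih h.2

lemma pvContrib (xs : List (String × String)) (k : String)
    (h : (xs.map Prod.fst).Nodup) :
    (if (PySem.Dict.mk xs).contains k
       then [k ++ ": " ++ (PySem.Dict.mk xs).getD k ""] else [])
    = (xs.filter (fun kv => kv.1 = k)).map pvFmt := by
  rw [pvFilter_key xs k h]
  cases hg : (PySem.Dict.mk xs).get? k with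
  | none => simp [PySem.Dict.contains_eq_isSome_get?, hg]
  | some v =>
    rw [PySem.Dict.contains_eq_isSome_get?, hg,
      PySem.Dict.getD_of_get?_eq_some _ _ hg]
    simp [pvFmt]

-- rank-r buckets for r < 6 filter on the r-th priority key; rank 6 on "not a priority key".
lemma pvRnk_eq_iff (k : String) :
    (pvRnk k = 0 ↔ k = "observation") ∧ (pvRnk k = 1 ↔ k = "learning") ∧
    (pvRnk k = 2 ↔ k = "decision") ∧ (pvRnk k = 3 ↔ k = "outcome") ∧
    (pvRnk k = 4 ↔ k = "context") ∧ (pvRnk k = 5 ↔ k = "reasoning") ∧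
    (pvRnk k = 6 ↔ ¬ k ∈ pvP) := by
  unfold pvRnk pvP; split_ifs <;> simp_all

-- A's second loop, characterised.
lemma pvFoldl_rest (xs : List (String × String)) (acc : List String) :
    xs.foldl (fun acc kv =>
        if kv.1 ∈ pvP then acc else acc ++ [kv.1 ++ ": " ++ kv.2]) acc
    = acc ++ (xs.filter (fun kv => ¬ kv.1 ∈ pvP)).map pvFmt := by
  induction xs generalizing acc with
  | nil => simp
  | cons kv xs ih =>
    simp only [List.foldl_cons, List.filter_cons, ih]
    by_cases h : kv.1 ∈ pvP <;> simp [h, pvFmt]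

-- A, reduced to filter/map form.
lemma pvA_eq (content : List (String × String)) :
    dict_to_semantic_text_py content =
      PySem.Str.join " | "
        ((pvP.filter (fun k => (PySem.Dict.mk content).contains k)).map
            (fun k => k ++ ": " ++ (PySem.Dict.mk content).getD k "")
          ++ (content.filter (fun kv => ¬ kv.1 ∈ pvP)).map pvFmt) := by
  unfold dict_to_semantic_text_py
  simp only [show (["observation", "learning", "decision", "outcome", "context",
    "reasoning"] : List String) = pvP from rfl]
  rw [PySem.List.foldl_append_if (fun k => (PySem.Dict.mk content).contains k)
    (fun k => k ++ ": " ++ (PySem.Dict.mk content).getD k ""), pvFoldl_rest,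
    List.nil_append]

-- B, reduced to the seven buckets.
lemma pvAlt_eq (content : List (String × String)) :
    dict_to_semantic_text_py_alt content =
      PySem.Str.join " | "
        (pvG 0 content ++ pvG 1 content ++ pvG 2 content ++ pvG 3 content
          ++ pvG 4 content ++ pvG 5 content ++ pvG 6 content) := by
  unfold dict_to_semantic_text_py_alt
  simp only [show (["observation", "learning", "decision", "outcome", "context",
    "reasoning"] : List String) = pvP from rfl]
  simp only [pvRank_getD, show ((pvP.length : Int)) = (6 : Int) from rfl,
    show List.replicate (pvP.length + 1) ([] : List String) =
      [[], [], [], [], [], [], []] from rfl]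
  rw [pvFold_buckets]
  simp [List.append_assoc]

-- ===== VERDICT (by name: the statement is the Claim_ definition above) =====
theorem dict_to_semantic_text_py_spec : Claim_equal_dict_to_semantic_text_py := by
  intro content _ hpre
  unfold Spec_dict_to_semantic_text_py
  rw [pvA_eq, pvAlt_eq]
  congr 1
  have h6 : pvG 6 content = (content.filter (fun kv => ¬ kv.1 ∈ pvP)).map pvFmt := by
    unfold pvG
    congr 1
    exact List.filter_congr fun kv _ => by
      simp [(pvRnk_eq_iff kv.1).2.2.2.2.2.2]
  have hg : ∀ (r : Nat) (key : String), (∀ k : String, pvRnk k = r ↔ k = key) →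
      pvG r content = (if (PySem.Dict.mk content).contains key
        then [key ++ ": " ++ (PySem.Dict.mk content).getD key ""] else []) := by
    intro r key hiff
    rw [pvContrib content key hpre]
    unfold pvG
    congr 1
    exact List.filter_congr fun kv _ => by simp [hiff kv.1]
  have g0 := hg 0 "observation" (fun k => (pvRnk_eq_iff k).1)
  have g1 := hg 1 "learning" (fun k => (pvRnk_eq_iff k).2.1)
  have g2 := hg 2 "decision" (fun k => (pvRnk_eq_iff k).2.2.1)
  have g3 := hg 3 "outcome" (fun k => (pvRnk_eq_iff k).2.2.2.1)
  have g4 := hg 4 "context" (fun k => (pvRnk_eq_iff k).2.2.2.2.1)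
  have g5 := hg 5 "reasoning" (fun k => (pvRnk_eq_iff k).2.2.2.2.2.1)
  rw [g0, g1, g2, g3, g4, g5, h6]
  simp only [pvP, List.filter_cons, List.filter_nil]
  by_cases c0 : (PySem.Dict.mk content).contains "observation" <;>
  by_cases c1 : (PySem.Dict.mk content).contains "learning" <;>
  by_cases c2 : (PySem.Dict.mk content).contains "decision" <;>
  by_cases c3 : (PySem.Dict.mk content).contains "outcome" <;>
  by_cases c4 : (PySem.Dict.mk content).contains "context" <;>
  by_cases c5 : (PySem.Dict.mk content).contains "reasoning" <;>
    simp [c0, c1, c2, c3, c4, c5]
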